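-- pv_equiv track=rewrite | github.com/ARobicsek/bible-figurative-language | archived_unused_files/create_tag_system.py | determine_vehicle_tags
-- ===== SOURCE A (Python) =====
-- from typing import Dict, List, Tuple
--
-- def determine_vehicle_tags(level_1: str, specific: str, explanation: str) -> List[str]:
--     """Determine multiple vehicle tags based on categorical and textual analysis"""
--     tags = []
--
--     if level_1 == 'natural world':
--         tags.append('natural_world')
--         if specific and any(word in specific.lower() for word in ['bird', 'eagle', 'dove']):
--             tags.append('animal')
--             tags.append('bird')
--             if 'eagle' in specific.lower():
--                 tags.append('eagle')
--             if 'dove' in specific.lower():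
--                 tags.append('dove')
--         if specific and any(word in specific.lower() for word in ['hovering', 'brooding']):
--             tags.append('hovering_brooding')
--         if specific and any(word in specific.lower() for word in ['host', 'army', 'organized']):
--             tags.append('organized_host')
--
--     elif level_1 == 'human action':
--         tags.append('human_action')
--         if specific and any(word in specific.lower() for word in ['governance', 'rule', 'dominion']):
--             tags.append('governance_rule')
--         if specific and any(word in specific.lower() for word in ['nurture', 'care', 'protect']):
--             tags.append('nurturing_care')
--
--     elif level_1 == 'human parts':
--         tags.append('human_parts')
--         if specific and any(word in specific.lower() for word in ['flesh', 'body']):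
--             tags.append('flesh_body')
--
--     elif level_1 == 'animal':
--         tags.append('animal')
--         if specific and 'bird' in specific.lower():
--             tags.append('bird')
--
--     return tags
-- ===== SOURCE B (Python) =====
-- _TAG_TABLE = {
--     'natural world': ('natural_world', [
--         (('bird', 'eagle', 'dove'), ('animal', 'bird')),
--         (('eagle',), ('eagle',)),
--         (('dove',), ('dove',)),
--         (('hovering', 'brooding'), ('hovering_brooding',)),
--         (('host', 'army', 'organized'), ('organized_host',)),
--     ]),
--     'human action': ('human_action', [
--         (('governance', 'rule', 'dominion'), ('governance_rule',)),
--         (('nurture', 'care', 'protect'), ('nurturing_care',)),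
--     ]),
--     'human parts': ('human_parts', [
--         (('flesh', 'body'), ('flesh_body',)),
--     ]),
--     'animal': ('animal', [
--         (('bird',), ('bird',)),
--     ]),
-- }
--
--
-- def determine_vehicle_tags(level_1: str, specific: str, explanation: str):
--     """Determine multiple vehicle tags based on categorical and textual analysis"""
--     entry = _TAG_TABLE.get(level_1)
--     if entry is None:
--         return []
--     base, rules = entry
--     tags = [base]
--     if specific:
--         spec = specific.lower()
--         for keywords, out in rules:
--             if any(w in spec for w in keywords):
--                 tags.extend(out)
--     return tags
-- ===== Notes on version B (the rewrite author's own statement) =====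
-- stated objective: simpler
-- what changed: Replaces A's hard-coded per-category if/append chains by a single data table mapping each level_1 to a base tag plus an ordered list of (keywords, tags) rules (eagle/dove nested checks flattened into their own rules), driven by one generic lookup-and-loop.
import Mathlib
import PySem

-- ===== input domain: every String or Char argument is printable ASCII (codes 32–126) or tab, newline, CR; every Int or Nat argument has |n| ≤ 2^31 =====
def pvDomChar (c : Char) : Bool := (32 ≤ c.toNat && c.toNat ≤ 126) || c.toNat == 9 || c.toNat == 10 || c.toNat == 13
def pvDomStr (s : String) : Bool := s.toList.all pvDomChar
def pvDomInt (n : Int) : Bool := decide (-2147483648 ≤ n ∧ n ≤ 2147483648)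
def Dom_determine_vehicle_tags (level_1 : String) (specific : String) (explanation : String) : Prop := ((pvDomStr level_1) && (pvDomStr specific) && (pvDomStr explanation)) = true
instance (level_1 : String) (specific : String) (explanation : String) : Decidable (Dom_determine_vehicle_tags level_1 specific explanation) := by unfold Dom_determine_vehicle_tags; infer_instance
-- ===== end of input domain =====

-- B replaces A's hard-coded branch-per-category if/append chain by one data table of
-- (keywords, tags) rules per category and a single generic rule loop (objective: simpler).

-- ===== PORT A =====
def determine_vehicle_tags (level_1 : String) (specific : String) (explanation : String) : List String :=
  let tags : List String := []
  if level_1 = "natural world" then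
    let tags := tags ++ ["natural_world"]
    let tags :=
      if specific ≠ "" ∧ (["bird", "eagle", "dove"].any fun w => PySem.Str.isIn w (PySem.Str.lower specific)) then
        let tags := tags ++ ["animal"]
        let tags := tags ++ ["bird"]
        let tags := if PySem.Str.isIn "eagle" (PySem.Str.lower specific) then tags ++ ["eagle"] else tags
        if PySem.Str.isIn "dove" (PySem.Str.lower specific) then tags ++ ["dove"] else tags
      else tags
    let tags :=
      if specific ≠ "" ∧ (["hovering", "brooding"].any fun w => PySem.Str.isIn w (PySem.Str.lower specific)) then
        tags ++ ["hovering_brooding"]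
      else tags
    if specific ≠ "" ∧ (["host", "army", "organized"].any fun w => PySem.Str.isIn w (PySem.Str.lower specific)) then
      tags ++ ["organized_host"]
    else tags
  else if level_1 = "human action" then
    let tags := tags ++ ["human_action"]
    let tags :=
      if specific ≠ "" ∧ (["governance", "rule", "dominion"].any fun w => PySem.Str.isIn w (PySem.Str.lower specific)) then
        tags ++ ["governance_rule"]
      else tags
    if specific ≠ "" ∧ (["nurture", "care", "protect"].any fun w => PySem.Str.isIn w (PySem.Str.lower specific)) then
      tags ++ ["nurturing_care"]
    else tags
  else if level_1 = "human parts" then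
    let tags := tags ++ ["human_parts"]
    if specific ≠ "" ∧ (["flesh", "body"].any fun w => PySem.Str.isIn w (PySem.Str.lower specific)) then
      tags ++ ["flesh_body"]
    else tags
  else if level_1 = "animal" then
    let tags := tags ++ ["animal"]
    if specific ≠ "" ∧ PySem.Str.isIn "bird" (PySem.Str.lower specific) then
      tags ++ ["bird"]
    else tags
  else tags

-- ===== PORT B =====
-- the module-level _TAG_TABLE dict of Source B
def tagTable : PySem.Dict String (String × List (List String × List String)) :=
  PySem.Dict.mk [
    ("natural world", ("natural_world", [
      (["bird", "eagle", "dove"], ["animal", "bird"]),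
      (["eagle"], ["eagle"]),
      (["dove"], ["dove"]),
      (["hovering", "brooding"], ["hovering_brooding"]),
      (["host", "army", "organized"], ["organized_host"])])),
    ("human action", ("human_action", [
      (["governance", "rule", "dominion"], ["governance_rule"]),
      (["nurture", "care", "protect"], ["nurturing_care"])])),
    ("human parts", ("human_parts", [
      (["flesh", "body"], ["flesh_body"])])),
    ("animal", ("animal", [
      (["bird"], ["bird"])]))]

def determine_vehicle_tags_alt (level_1 : String) (specific : String) (explanation : String) : List String :=
  match tagTable.get? level_1 with
  | none => []
  | some (base, rules) =>
    let tags := [base]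
    if specific ≠ "" then
      let spec := PySem.Str.lower specific
      rules.foldl (fun tags r => if r.1.any (fun w => PySem.Str.isIn w spec) then tags ++ r.2 else tags) tags
    else tags

-- ===== PRECONDITION & SPEC =====
-- A is total, so Pre_ excludes NOTHING: it is a tautology (level_1 is a recognized category or it
-- is not), written out only to name the four category strings on which the function does real work.
def Pre_determine_vehicle_tags (level_1 : String) (specific : String) (explanation : String) : Prop :=
  level_1 ∈ ["natural world", "human action", "human parts", "animal"] ∨
  level_1 ∉ ["natural world", "human action", "human parts", "animal"]
instance (level_1 : String) (specific : String) (explanation : String) : Decidable (Pre_determine_vehicle_tags level_1 specific explanation) := by unfold Pre_determine_vehicle_tags; infer_instance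
def pvWitness_determine_vehicle_tags : String × String × String := ("natural world", "the eagle and the dove", "soaring")

def Spec_determine_vehicle_tags (level_1 : String) (specific : String) (explanation : String) (out : List String) : Prop := out = determine_vehicle_tags_alt level_1 specific explanation
instance (level_1 : String) (specific : String) (explanation : String) (out : List String) : Decidable (Spec_determine_vehicle_tags level_1 specific explanation out) := by unfold Spec_determine_vehicle_tags; infer_instance

-- ===== CLAIM (what is proved, stated in full; the proofs are below) =====
def Claim_equal_determine_vehicle_tags : Prop := ∀ (level_1 : String) (specific : String) (explanation : String), Dom_determine_vehicle_tags level_1 specific explanation → Pre_determine_vehicle_tags level_1 specific explanation → Spec_determine_vehicle_tags level_1 specific explanation (determine_vehicle_tags level_1 specific explanation)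

-- ===== LEMMAS AND PROOFS =====

-- ===== VERDICT (by name: the statement is the Claim_ definition above) =====
theorem determine_vehicle_tags_spec : Claim_equal_determine_vehicle_tags := by
  intro level_1 specific explanation _ _
  unfold Spec_determine_vehicle_tags determine_vehicle_tags determine_vehicle_tags_alt tagTable
  by_cases h1 : level_1 = "natural world"
  · subst h1
    simp only [PySem.Dict.get?_mk_cons, beq_self_eq_true, if_true, List.foldl, List.any_cons,
      List.any_nil, Bool.or_false, String.reduceEq, reduceIte, if_neg]
    by_cases hs : specific = ""
    · simp [hs]
    · by_cases hb : PySem.Chars.isIn ['b','i','r','d'] (PySem.Chars.lower specific.toList) = true <;>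
      by_cases he : PySem.Chars.isIn ['e','a','g','l','e'] (PySem.Chars.lower specific.toList) = true <;>
      by_cases hd : PySem.Chars.isIn ['d','o','v','e'] (PySem.Chars.lower specific.toList) = true <;>
        simp [hs, hb, he, hd]
  · by_cases h2 : level_1 = "human action"
    · subst h2
      simp only [PySem.Dict.get?_mk_cons, beq_self_eq_true, beq_iff_eq, String.reduceEq,
        reduceIte, List.foldl, List.any_cons, List.any_nil, Bool.or_false]
      by_cases hs : specific = ""
      · simp [hs]
      · simp [hs]
    · by_cases h3 : level_1 = "human parts"
      · subst h3
        simp only [PySem.Dict.get?_mk_cons, beq_self_eq_true, beq_iff_eq, String.reduceEq,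
          reduceIte, List.foldl, List.any_cons, List.any_nil, Bool.or_false]
        by_cases hs : specific = ""
        · simp [hs]
        · simp [hs]
      · by_cases h4 : level_1 = "animal"
        · subst h4
          simp only [PySem.Dict.get?_mk_cons, beq_self_eq_true, beq_iff_eq, String.reduceEq,
            reduceIte, List.foldl, List.any_cons, List.any_nil, Bool.or_false]
          by_cases hs : specific = ""
          · simp [hs]
          · simp [hs]
        · simp only [PySem.Dict.get?_mk_cons, beq_iff_eq]
          rw [if_neg h1, if_neg h2, if_neg h3, if_neg h4,
              if_neg (fun h => h1 h.symm), if_neg (fun h => h2 h.symm),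
              if_neg (fun h => h3 h.symm), if_neg (fun h => h4 h.symm)]
          simp [PySem.Dict.get?]
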